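-- pv_equiv track=rewrite | github.com/kelvinhuang0327/number-pattern-research | tools/backtest_biglotto_comprehensive.py | strat_cluster_pivot
-- ===== SOURCE A (Python) =====
-- from collections import Counter
-- from itertools import combinations
--
-- MAX_NUM = 49
--
-- PICK = 6
--
-- def strat_cluster_pivot(history, num_bets=4):
--     """Co-occurrence anchor expansion. Deterministic."""
--     window = min(150, len(history))
--     recent = history[-window:]
--
--     cooccur = Counter()
--     for d in recent:
--         nums = sorted(d['numbers'])
--         for pair in combinations(nums, 2):
--             cooccur[pair] += 1
--
--     num_scores = Counter()
--     for (a, b), count in cooccur.items():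
--         num_scores[a] += count
--         num_scores[b] += count
--
--     centers = [num for num, _ in num_scores.most_common(num_bets + 2)]
--
--     bets = []
--     exclude = set()
--     for center in centers:
--         if len(bets) >= num_bets:
--             break
--         candidates = Counter()
--         for (a, b), count in cooccur.items():
--             if a == center and b not in exclude:
--                 candidates[b] += count
--             elif b == center and a not in exclude:
--                 candidates[a] += count
--
--         bet = [center]
--         for n, _ in candidates.most_common(PICK - 1):
--             bet.append(n)
--
--         if len(bet) < PICK:
--             for n in range(1, MAX_NUM + 1):
--                 if n not in bet and n not in exclude:
--                     bet.append(n)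
--                 if len(bet) == PICK:
--                     break
--
--         bets.append(sorted(bet[:PICK]))
--         exclude.update(bet[:2])
--
--     return bets
-- ===== SOURCE B (Python) =====
-- from collections import Counter
-- from itertools import combinations
--
-- MAX_NUM = 49
--
-- PICK = 6
--
-- def strat_cluster_pivot(history, num_bets=4):
--     """Co-occurrence anchor expansion via a precomputed adjacency index. Deterministic."""
--     window = min(150, len(history))
--     recent = history[-window:]
--
--     cooccur = Counter()
--     for d in recent:
--         nums = sorted(d['numbers'])
--         for pair in combinations(nums, 2):
--             cooccur[pair] += 1
--
--     # One pass over cooccur builds both the per-number scores and an adjacency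
--     # index (neighbor -> co-count, in first-seen order), so each center's
--     # candidate list is a lookup instead of a rescan of all pairs.
--     num_scores = Counter()
--     adj = {}
--     for (a, b), count in cooccur.items():
--         num_scores[a] += count
--         num_scores[b] += count
--         inner = adj.setdefault(a, {})
--         inner[b] = inner.get(b, 0) + count
--         if b != a:
--             inner = adj.setdefault(b, {})
--             inner[a] = inner.get(a, 0) + count
--
--     centers = [num for num, _ in num_scores.most_common(num_bets + 2)]
--
--     bets = []
--     exclude = set()
--     for center in centers:
--         if len(bets) >= num_bets:
--             break
--         neighbors = adj.get(center, {})
--         cands = [(n, c) for n, c in neighbors.items() if n not in exclude]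
--         top = sorted(cands, key=lambda nc: nc[1], reverse=True)[:PICK - 1]
--
--         bet = [center] + [n for n, _ in top]
--
--         if len(bet) < PICK:
--             for n in range(1, MAX_NUM + 1):
--                 if n not in bet and n not in exclude:
--                     bet.append(n)
--                 if len(bet) == PICK:
--                     break
--
--         bets.append(sorted(bet[:PICK]))
--         exclude.update(bet[:2])
--
--     return bets
-- ===== Notes on version B (the rewrite author's own statement) =====
-- stated objective: faster
-- what changed: B builds, in one pass over cooccur, a per-number adjacency index (neighbor -> co-count, first-seen order) alongside num_scores, so each center's candidate list is a single lookup filtered against exclude instead of A's rescan of every co-occurrence pair per center.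
-- outside the precondition, e.g. on strat_cluster_pivot([{'x': [1]}], 4): A raises KeyError, B raises KeyError
import Mathlib
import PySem

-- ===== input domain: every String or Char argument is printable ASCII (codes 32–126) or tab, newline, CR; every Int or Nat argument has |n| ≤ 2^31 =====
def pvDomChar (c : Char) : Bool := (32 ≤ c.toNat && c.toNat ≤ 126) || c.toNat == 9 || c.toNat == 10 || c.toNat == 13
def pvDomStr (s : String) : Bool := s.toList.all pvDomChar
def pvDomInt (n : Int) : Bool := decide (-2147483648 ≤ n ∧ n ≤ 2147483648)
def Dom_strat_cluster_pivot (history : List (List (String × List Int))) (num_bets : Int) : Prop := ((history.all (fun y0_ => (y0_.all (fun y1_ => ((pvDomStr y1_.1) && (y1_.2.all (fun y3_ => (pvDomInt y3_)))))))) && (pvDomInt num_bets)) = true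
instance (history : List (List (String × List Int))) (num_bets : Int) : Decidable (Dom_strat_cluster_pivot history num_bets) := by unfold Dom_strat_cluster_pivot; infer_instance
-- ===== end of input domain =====

-- B replaces A's per-center rescan of all co-occurring pairs by an adjacency index built once
-- (one pass over cooccur computing scores and neighbor maps together); same return value.

-- ===== PORT A =====

-- shared by both Pythons verbatim: counting pair co-occurrences over the recent window
def pvAddPair (co : PySem.Dict (Int × Int) Int) (pr : List Int) : PySem.Dict (Int × Int) Int :=
  match pr with
  | [a, b] => co.modify (a, b) 0 (· + 1)
  | _ => co

def pvCooccur (recent : List (List (String × List Int))) : PySem.Dict (Int × Int) Int :=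
  recent.foldl (fun co d =>
    match (PySem.Dict.ofList d).get? "numbers" with
    | some ns => (PySem.List.combinations (PySem.List.sorted ns (fun x => x)) 2).foldl pvAddPair co
    | none => co) PySem.Dict.empty   -- none = KeyError, excluded by Pre_

-- shared by both Pythons verbatim: the padding loop over range(1, 50) with its break
def pvPadGo : List Int → List Int → PySem.Set Int → List Int
  | [], bet, _ => bet
  | n :: rest, bet, exclude =>
    let bet' := if !(bet.contains n) && !(PySem.Set.contains exclude n) then bet ++ [n] else bet
    if bet'.length == 6 then bet' else pvPadGo rest bet' exclude

def pvPad (bet : List Int) (exclude : PySem.Set Int) : List Int :=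
  if bet.length < 6 then pvPadGo (PySem.List.pyRange 1 50 1) bet exclude else bet

-- A's inner scan of ALL cooccur items for one center
def pvScanStep (center : Int) (exclude : PySem.Set Int) (cd : PySem.Dict Int Int)
    (it : (Int × Int) × Int) : PySem.Dict Int Int :=
  if it.1.1 == center && !(PySem.Set.contains exclude it.1.2) then cd.modify it.1.2 0 (· + it.2)
  else if it.1.2 == center && !(PySem.Set.contains exclude it.1.1) then cd.modify it.1.1 0 (· + it.2)
  else cd

def pvLoopA (co : PySem.Dict (Int × Int) Int) (num_bets : Int) :
    List Int → List (List Int) → PySem.Set Int → List (List Int)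
  | [], bets, _ => bets
  | center :: rest, bets, exclude =>
    if (bets.length : Int) ≥ num_bets then bets
    else
      let candidates := co.items.foldl (pvScanStep center exclude) PySem.Dict.empty
      let bet := center :: ((PySem.List.sorted candidates.items (fun p => p.2) true).take 5).map Prod.fst
      let bet2 := pvPad bet exclude
      pvLoopA co num_bets rest (bets ++ [PySem.List.sorted (bet2.take 6) (fun x => x)])
        (PySem.Set.update exclude (bet2.take 2))

def strat_cluster_pivot (history : List (List (String × List Int))) (num_bets : Int) : List (List Int) :=
  let window : Int := min 150 (history.length : Int)
  let recent := PySem.List.slice history (some (-window)) none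
  let cooccur := pvCooccur recent
  let num_scores := cooccur.items.foldl
    (fun ns it => (ns.modify it.1.1 0 (· + it.2)).modify it.1.2 0 (· + it.2)) PySem.Dict.empty
  let centers := ((PySem.List.sorted num_scores.items (fun p => p.2) true).take (num_bets + 2).toNat).map Prod.fst
  pvLoopA cooccur num_bets centers [] PySem.Set.empty

-- ===== PORT B =====

def pvNsStep (ns : PySem.Dict Int Int) (it : (Int × Int) × Int) : PySem.Dict Int Int :=
  (ns.modify it.1.1 0 (· + it.2)).modify it.1.2 0 (· + it.2)

def pvAdjStep (adj : PySem.Dict Int (PySem.Dict Int Int)) (it : (Int × Int) × Int) :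
    PySem.Dict Int (PySem.Dict Int Int) :=
  let adj1 := adj.modify it.1.1 PySem.Dict.empty (fun inner => inner.modify it.1.2 0 (· + it.2))
  if it.1.2 ≠ it.1.1 then
    adj1.modify it.1.2 PySem.Dict.empty (fun inner => inner.modify it.1.1 0 (· + it.2))
  else adj1

-- one pass over cooccur: scores and adjacency index together
def pvIndexStep (st : PySem.Dict Int Int × PySem.Dict Int (PySem.Dict Int Int))
    (it : (Int × Int) × Int) : PySem.Dict Int Int × PySem.Dict Int (PySem.Dict Int Int) :=
  (pvNsStep st.1 it, pvAdjStep st.2 it)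

def pvLoopB (adj : PySem.Dict Int (PySem.Dict Int Int)) (num_bets : Int) :
    List Int → List (List Int) → PySem.Set Int → List (List Int)
  | [], bets, _ => bets
  | center :: rest, bets, exclude =>
    if (bets.length : Int) ≥ num_bets then bets
    else
      let neighbors := adj.getD center PySem.Dict.empty
      let cands := neighbors.items.filter (fun nc => !(PySem.Set.contains exclude nc.1))
      let top := (PySem.List.sorted cands (fun nc => nc.2) true).take 5
      let bet := center :: top.map Prod.fst
      let bet2 := pvPad bet exclude
      pvLoopB adj num_bets rest (bets ++ [PySem.List.sorted (bet2.take 6) (fun x => x)])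
        (PySem.Set.update exclude (bet2.take 2))

def strat_cluster_pivot_alt (history : List (List (String × List Int))) (num_bets : Int) : List (List Int) :=
  let window : Int := min 150 (history.length : Int)
  let recent := PySem.List.slice history (some (-window)) none
  let cooccur := pvCooccur recent
  let idx := cooccur.items.foldl pvIndexStep (PySem.Dict.empty, PySem.Dict.empty)
  let centers := ((PySem.List.sorted idx.1.items (fun p => p.2) true).take (num_bets + 2).toNat).map Prod.fst
  pvLoopB idx.2 num_bets centers [] PySem.Set.empty

-- ===== PRECONDITION & SPEC =====
-- Pre_ excludes inputs where some draw in the recent window lacks the key "numbers":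
-- there both Pythons raise KeyError.
def Pre_strat_cluster_pivot (history : List (List (String × List Int))) (num_bets : Int) : Prop :=
  ∀ d ∈ history.drop (history.length - 150), "numbers" ∈ d.map Prod.fst
instance (history : List (List (String × List Int))) (num_bets : Int) : Decidable (Pre_strat_cluster_pivot history num_bets) := by unfold Pre_strat_cluster_pivot; infer_instance

def pvWitness_strat_cluster_pivot : (List (List (String × List Int))) × Int :=
  ([[("numbers", [1, 2, 3])], [("numbers", [2, 3, 4])]], 2)

def Spec_strat_cluster_pivot (history : List (List (String × List Int))) (num_bets : Int) (out : List (List Int)) : Prop := out = strat_cluster_pivot_alt history num_bets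
instance (history : List (List (String × List Int))) (num_bets : Int) (out : List (List Int)) : Decidable (Spec_strat_cluster_pivot history num_bets out) := by unfold Spec_strat_cluster_pivot; infer_instance

-- ===== CLAIM (what is proved, stated in full; the proofs are below) =====
def Claim_equal_strat_cluster_pivot : Prop := ∀ (history : List (List (String × List Int))) (num_bets : Int), Dom_strat_cluster_pivot history num_bets → Pre_strat_cluster_pivot history num_bets → Spec_strat_cluster_pivot history num_bets (strat_cluster_pivot history num_bets)

-- ===== LEMMAS AND PROOFS =====

theorem pv_find_filter (pk : Int → Bool) (k : Int) (hk : pk k = true) (l : List (Int × Int)) :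
    (l.filter (fun nc => pk nc.1)).find? (fun p => p.1 == k) = l.find? (fun p => p.1 == k) := by
  induction l with
  | nil => rfl
  | cons x t ih =>
    by_cases hx : pk x.1
    · simp [hx, List.find?_cons, ih]
    · have hxk : (x.1 == k) = false := by
        by_cases e : x.1 = k
        · subst e; exact absurd hk hx
        · simp [e]
      simp [hx, hxk, ih]

theorem pv_any_filter (pk : Int → Bool) (k : Int) (hk : pk k = true) (l : List (Int × Int)) :
    (l.filter (fun nc => pk nc.1)).any (fun p => p.1 == k) = l.any (fun p => p.1 == k) := by
  induction l with
  | nil => rfl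
  | cons x t ih =>
    by_cases hx : pk x.1
    · simp [hx, List.any_cons, ih]
    · have hxk : (x.1 == k) = false := by
        by_cases e : x.1 = k
        · subst e; exact absurd hk hx
        · simp [e]
      simp [hx, hxk, ih]

theorem pv_getD_filter (pk : Int → Bool) (k : Int) (hk : pk k = true)
    (d d' : PySem.Dict Int Int) (h : d.items = d'.items.filter (fun nc => pk nc.1)) :
    d.getD k 0 = d'.getD k 0 := by
  simp [PySem.Dict.getD, PySem.Dict.get?, h, pv_find_filter pk k hk]

theorem pv_contains_filter (pk : Int → Bool) (k : Int) (hk : pk k = true)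
    (d d' : PySem.Dict Int Int) (h : d.items = d'.items.filter (fun nc => pk nc.1)) :
    d.contains k = d'.contains k := by
  simp [PySem.Dict.contains, h, pv_any_filter pk k hk]

theorem pv_filter_map_replace_pos (pk : Int → Bool) (k : Int) (hk : pk k = true)
    (v : Int) (l : List (Int × Int)) :
    ((l.map (fun p => if p.1 == k then (k, v) else p)).filter (fun nc => pk nc.1))
      = (l.filter (fun nc => pk nc.1)).map (fun p => if p.1 == k then (k, v) else p) := by
  induction l with
  | nil => rfl
  | cons x t ih =>
    by_cases e : x.1 = k
    · simpa [e, hk] using ih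
    · by_cases hx : pk x.1 <;> simpa [e, hx] using ih

theorem pv_filter_map_replace_neg (pk : Int → Bool) (k : Int) (hk : pk k = false)
    (v : Int) (l : List (Int × Int)) :
    ((l.map (fun p => if p.1 == k then (k, v) else p)).filter (fun nc => pk nc.1))
      = l.filter (fun nc => pk nc.1) := by
  induction l with
  | nil => rfl
  | cons x t ih =>
    by_cases e : x.1 = k
    · simpa [e, hk] using ih
    · by_cases hx : pk x.1 <;> simpa [e, hx] using ih

theorem pv_modify_filter_pos (pk : Int → Bool) (k : Int) (hk : pk k = true)
    (d d' : PySem.Dict Int Int) (h : d.items = d'.items.filter (fun nc => pk nc.1))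
    (f : Int → Int) :
    (d.modify k 0 f).items = (d'.modify k 0 f).items.filter (fun nc => pk nc.1) := by
  have hv : d.getD k 0 = d'.getD k 0 := pv_getD_filter pk k hk d d' h
  have hc : d.contains k = d'.contains k := pv_contains_filter pk k hk d d' h
  by_cases hcon : d'.contains k = true
  · have hc' : d.contains k = true := hc.trans hcon
    unfold PySem.Dict.modify PySem.Dict.insert
    rw [if_pos hc', if_pos hcon]
    show (d.items.map _) = (d'.items.map _).filter _
    rw [hv, h, pv_filter_map_replace_pos pk k hk]
  · have hc2 : ¬ d.contains k = true := by rw [hc]; exact hcon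
    unfold PySem.Dict.modify PySem.Dict.insert
    rw [if_neg hc2, if_neg hcon]
    show (d.items ++ _) = (d'.items ++ _).filter _
    rw [hv, h, List.filter_append]
    simp [hk]

theorem pv_modify_filter_neg (pk : Int → Bool) (k : Int) (hk : pk k = false)
    (d d' : PySem.Dict Int Int) (h : d.items = d'.items.filter (fun nc => pk nc.1))
    (f : Int → Int) :
    d.items = (d'.modify k 0 f).items.filter (fun nc => pk nc.1) := by
  by_cases hcon : d'.contains k = true
  · unfold PySem.Dict.modify PySem.Dict.insert
    rw [if_pos hcon]
    show d.items = (d'.items.map _).filter _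
    rw [pv_filter_map_replace_neg pk k hk, h]
  · unfold PySem.Dict.modify PySem.Dict.insert
    rw [if_neg hcon]
    show d.items = (d'.items ++ _).filter _
    rw [List.filter_append, h]
    simp [hk]

theorem pv_scan_step_filter (c : Int) (ex : PySem.Set Int) (it : (Int × Int) × Int)
    (d d' : PySem.Dict Int Int)
    (h : d.items = d'.items.filter (fun nc => !(PySem.Set.contains ex nc.1))) :
    (pvScanStep c ex d it).items
      = (pvScanStep c PySem.Set.empty d' it).items.filter (fun nc => !(PySem.Set.contains ex nc.1)) := by
  obtain ⟨⟨a, b⟩, cnt⟩ := it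
  have hemp : ∀ x : Int, PySem.Set.contains PySem.Set.empty x = false := fun _ => rfl
  simp only [pvScanStep]
  by_cases ha : a = c
  · by_cases hxb : PySem.Set.contains ex b = true
    · by_cases hb2 : b = c
      · have hxa : PySem.Set.contains ex a = true := by rw [ha, ← hb2]; exact hxb
        rw [if_neg (by rw [hxb]; simp), if_neg (by rw [hxa]; simp),
          if_pos (by rw [hemp]; simp [ha])]
        exact pv_modify_filter_neg (fun n => !(PySem.Set.contains ex n)) b
          (by show (!(PySem.Set.contains ex b)) = false; rw [hxb]; rfl) d d' h _
      · rw [if_neg (by rw [hxb]; simp), if_neg (by simp [hb2]),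
          if_pos (by rw [hemp]; simp [ha])]
        exact pv_modify_filter_neg (fun n => !(PySem.Set.contains ex n)) b
          (by show (!(PySem.Set.contains ex b)) = false; rw [hxb]; rfl) d d' h _
    · have hxb' : PySem.Set.contains ex b = false := by
        revert hxb; cases PySem.Set.contains ex b <;> simp
      rw [if_pos (by rw [hxb']; simp [ha]), if_pos (by rw [hemp]; simp [ha])]
      exact pv_modify_filter_pos (fun n => !(PySem.Set.contains ex n)) b
        (by show (!(PySem.Set.contains ex b)) = true; rw [hxb']; rfl) d d' h _
  · by_cases hb : b = c
    · by_cases hxa : PySem.Set.contains ex a = true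
      · rw [if_neg (by simp [ha]), if_neg (by rw [hxa]; simp),
          if_neg (by simp [ha]), if_pos (by rw [hemp]; simp [hb])]
        exact pv_modify_filter_neg (fun n => !(PySem.Set.contains ex n)) a
          (by show (!(PySem.Set.contains ex a)) = false; rw [hxa]; rfl) d d' h _
      · have hxa' : PySem.Set.contains ex a = false := by
          revert hxa; cases PySem.Set.contains ex a <;> simp
        rw [if_neg (by simp [ha]), if_pos (by rw [hxa']; simp [hb]),
          if_neg (by simp [ha]), if_pos (by rw [hemp]; simp [hb])]
        exact pv_modify_filter_pos (fun n => !(PySem.Set.contains ex n)) a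
          (by show (!(PySem.Set.contains ex a)) = true; rw [hxa']; rfl) d d' h _
    · rw [if_neg (by simp [ha]), if_neg (by simp [hb]),
        if_neg (by simp [ha]), if_neg (by simp [hb])]
      exact h

theorem pv_scan_filter (c : Int) (ex : PySem.Set Int) (L : List ((Int × Int) × Int))
    (d d' : PySem.Dict Int Int)
    (h : d.items = d'.items.filter (fun nc => !(PySem.Set.contains ex nc.1))) :
    (L.foldl (pvScanStep c ex) d).items
      = (L.foldl (pvScanStep c PySem.Set.empty) d').items.filter (fun nc => !(PySem.Set.contains ex nc.1)) := by
  induction L generalizing d d' with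
  | nil => exact h
  | cons x t ih =>
    simp only [List.foldl_cons]
    exact ih _ _ (pv_scan_step_filter c ex x d d' h)

theorem pv_adj_step_getD (c : Int) (adj : PySem.Dict Int (PySem.Dict Int Int)) (it : (Int × Int) × Int) :
    (pvAdjStep adj it).getD c PySem.Dict.empty
      = pvScanStep c PySem.Set.empty (adj.getD c PySem.Dict.empty) it := by
  obtain ⟨⟨a, b⟩, cnt⟩ := it
  have hemp : ∀ x : Int, PySem.Set.contains PySem.Set.empty x = false := fun _ => rfl
  simp only [pvAdjStep, pvScanStep]
  by_cases hba : b = a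
  · subst hba
    by_cases hbc : b = c
    · simp [hbc]
    · have hcb : ¬ c = b := fun h => hbc h.symm
      simp [hbc, hcb, PySem.Dict.getD_modify]
  · by_cases ha : a = c
    · have hbc : ¬ b = c := by rw [← ha]; exact hba
      have hcb : ¬ c = b := fun h => hbc h.symm
      simp [ha, hbc, hcb, PySem.Dict.getD_modify]
    · by_cases hbc : b = c
      · have hca : ¬ c = a := fun h => ha h.symm
        simp [ha, hbc, hca, PySem.Dict.getD_modify]
      · have hcb : ¬ c = b := fun h => hbc h.symm
        have hca : ¬ c = a := fun h => ha h.symm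
        simp [ha, hba, hbc, hcb, hca, PySem.Dict.getD_modify]

theorem pv_adj_getD (c : Int) (L : List ((Int × Int) × Int)) (adj : PySem.Dict Int (PySem.Dict Int Int)) :
    (L.foldl pvAdjStep adj).getD c PySem.Dict.empty
      = L.foldl (pvScanStep c PySem.Set.empty) (adj.getD c PySem.Dict.empty) := by
  induction L generalizing adj with
  | nil => rfl
  | cons x t ih =>
    simp only [List.foldl_cons]
    rw [ih, pv_adj_step_getD]

theorem pv_loop_eq (co : PySem.Dict (Int × Int) Int) (nb : Int) (centers : List Int)
    (bets : List (List Int)) (ex : PySem.Set Int) :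
    pvLoopA co nb centers bets ex
      = pvLoopB (co.items.foldl pvAdjStep PySem.Dict.empty) nb centers bets ex := by
  induction centers generalizing bets ex with
  | nil => rfl
  | cons center rest ih =>
    simp only [pvLoopA, pvLoopB]
    split_ifs with hlen
    · rfl
    · have hcand : (co.items.foldl (pvScanStep center ex) PySem.Dict.empty).items
          = ((co.items.foldl pvAdjStep PySem.Dict.empty).getD center PySem.Dict.empty).items.filter
              (fun nc => !(PySem.Set.contains ex nc.1)) := by
        rw [pv_adj_getD]
        exact pv_scan_filter center ex co.items PySem.Dict.empty PySem.Dict.empty rfl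
      rw [hcand]
      exact ih _ _

theorem pv_index_split (L : List ((Int × Int) × Int)) :
    L.foldl pvIndexStep (PySem.Dict.empty, PySem.Dict.empty)
      = (L.foldl pvNsStep PySem.Dict.empty, L.foldl pvAdjStep PySem.Dict.empty) := by
  rw [show pvIndexStep = (fun st it => (pvNsStep st.1 it, pvAdjStep st.2 it)) from rfl]
  exact PySem.List.foldl_prod_mk pvNsStep pvAdjStep L _ _

-- ===== VERDICT (by name: the statement is the Claim_ definition above) =====
theorem strat_cluster_pivot_spec : Claim_equal_strat_cluster_pivot := by
  intro history num_bets _ _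
  unfold Spec_strat_cluster_pivot
  simp only [strat_cluster_pivot, strat_cluster_pivot_alt]
  rw [pv_index_split]
  exact pv_loop_eq _ _ _ _ _
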